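-- pv_equiv track=rewrite | github.com/blueLiner33/robotTour | pico files/python/path_solver.py | list_commands
-- ===== SOURCE A (Python) =====
-- def list_commands(commands,start_point):
--     heading = None
--     if (3 >= start_point) and (start_point >= 0):#top
--         heading = 'down'
--     elif (start_point >= 4) and (start_point <= 8):#right side
--         heading = 'left'
--     elif (start_point >= 9) and (start_point <= 12):#bottom
--         heading = 'up'
--     elif (start_point >= 13) and (start_point <= 17):#left side
--         heading = 'right'
--     #180 = 3,forward = 0, left = 1,right =2
--     prior_point = commands[0]
--     sequence_commands = []
--     for element in commands:
--         if prior_point[0] < element[0]:#right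
--             if heading == 'down':
--                 sequence_commands.append(1)
--                 sequence_commands.append(0)
--                 heading = 'right'
--             elif heading == 'left':
--                 sequence_commands.append(3)
--                 sequence_commands.append(0)
--                 heading = 'right'
--             elif heading == 'up':
--                 sequence_commands.append(2)
--                 sequence_commands.append(0)
--                 heading = 'right'
--             elif heading == 'right':
--                 sequence_commands.append(0)
--             prior_point = element
--         elif prior_point[0] > element[0]:#left
--             if heading == 'down':
--                 sequence_commands.append(2)
--                 sequence_commands.append(0)
--                 heading = 'left'
--             elif heading == 'left':
--                 sequence_commands.append(0)
--             elif heading == 'up':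
--                 sequence_commands.append(1)
--                 sequence_commands.append(0)
--                 heading = 'left'
--             elif heading == 'right':
--                 sequence_commands.append(3)
--                 sequence_commands.append(0)
--                 heading = 'left'
--             prior_point = element
--         elif prior_point[1]<element[1]:#up
--             if heading == 'down':
--                 sequence_commands.append(3)
--                 sequence_commands.append(0)
--                 heading = 'up'
--             elif heading == 'left':
--                 sequence_commands.append(2)
--                 sequence_commands.append(0)
--                 heading = 'up'
--             elif heading == 'up':
--                 sequence_commands.append(0)
--             elif heading == 'right':
--                 sequence_commands.append(1)
--                 sequence_commands.append(0)
--                 heading = 'up'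
--             prior_point = element
--         elif prior_point[1]>element[1]:#down
--             if heading == 'down':
--                 sequence_commands.append(0)
--             elif heading == 'left':
--                 sequence_commands.append(1)
--                 sequence_commands.append(0)
--                 heading = 'down'
--             elif heading == 'up':
--                 sequence_commands.append(3)
--                 sequence_commands.append(0)
--                 heading = 'down'
--             elif heading == 'right':
--                 sequence_commands.append(2)
--                 sequence_commands.append(0)
--                 heading = 'down'
--             prior_point = element
--     return sequence_commands
-- ===== SOURCE B (Python) =====
-- def list_commands(commands, start_point):
--     # stage 1: collapse the waypoint path into numeric direction codes
--     # (right=0, up=1, left=2, down=3 -- counterclockwise quarter turns)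
--     prior = commands[0]
--     dirs = []
--     for p in commands:
--         if p[0] != prior[0]:
--             dirs.append(0 if p[0] > prior[0] else 2)
--         elif p[1] != prior[1]:
--             dirs.append(1 if p[1] > prior[1] else 3)
--         else:
--             continue
--         prior = p
--     # stage 2: start heading as an angle code; unknown start -> nothing is ever emitted
--     if 0 <= start_point <= 3:
--         h = 3
--     elif 4 <= start_point <= 8:
--         h = 2
--     elif 9 <= start_point <= 12:
--         h = 1
--     elif 13 <= start_point <= 17:
--         h = 0
--     else:
--         return []
--     # stage 3: turn code from the modular angle difference
--     out = []
--     for d in dirs: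
--         diff = (d - h) % 4
--         if diff:
--             out.append((0, 1, 3, 2)[diff])
--         out.append(0)
--         h = d
--     return out
-- ===== Notes on version B (the rewrite author's own statement) =====
-- stated objective: alternative
-- what changed: B works in staged passes over a numeric encoding: it first collapses the waypoint list into angle codes (right=0,up=1,left=2,down=3), then emits turn codes arithmetically from the modular angle difference (d-h)%4 indexing (0,1,3,2), replacing A's single pass with its 16-branch heading/direction string case analysis.
import Mathlib
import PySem

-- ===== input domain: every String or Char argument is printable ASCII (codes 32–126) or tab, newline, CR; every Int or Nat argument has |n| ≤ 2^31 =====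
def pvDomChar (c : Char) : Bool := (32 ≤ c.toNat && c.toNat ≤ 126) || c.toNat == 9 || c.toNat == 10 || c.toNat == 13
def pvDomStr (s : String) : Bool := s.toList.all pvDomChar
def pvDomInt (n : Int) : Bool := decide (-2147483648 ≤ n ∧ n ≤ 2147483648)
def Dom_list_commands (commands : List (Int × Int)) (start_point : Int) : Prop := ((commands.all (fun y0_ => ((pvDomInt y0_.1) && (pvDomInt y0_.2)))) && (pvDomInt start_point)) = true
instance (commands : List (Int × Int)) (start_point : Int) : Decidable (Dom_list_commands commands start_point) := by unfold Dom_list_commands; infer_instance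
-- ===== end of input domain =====

-- B re-decomposes the task into staged passes: collapse the path into numeric direction codes,
-- then emit turn codes from the modular angle difference (d - h) % 4, replacing A's single pass
-- with its 16-branch heading/direction case analysis. Pre_ excludes only the empty list, where
-- both Pythons raise IndexError (commands[0]).

-- ===== PORT A =====
-- A's loop body, transliterated branch for branch; state = (heading, prior_point, sequence_commands)
def stepA (st : Option String × (Int × Int) × List Int) (element : Int × Int) :
    Option String × (Int × Int) × List Int :=
  let (heading, prior, acc) := st
  if prior.1 < element.1 then -- right
    (if heading == some "down" then (some "right", element, acc ++ [1, 0])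
     else if heading == some "left" then (some "right", element, acc ++ [3, 0])
     else if heading == some "up" then (some "right", element, acc ++ [2, 0])
     else if heading == some "right" then (some "right", element, acc ++ [0])
     else (heading, element, acc))
  else if prior.1 > element.1 then -- left
    (if heading == some "down" then (some "left", element, acc ++ [2, 0])
     else if heading == some "left" then (some "left", element, acc ++ [0])
     else if heading == some "up" then (some "left", element, acc ++ [1, 0])
     else if heading == some "right" then (some "left", element, acc ++ [3, 0])
     else (heading, element, acc))
  else if prior.2 < element.2 then -- up
    (if heading == some "down" then (some "up", element, acc ++ [3, 0])
     else if heading == some "left" then (some "up", element, acc ++ [2, 0])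
     else if heading == some "up" then (some "up", element, acc ++ [0])
     else if heading == some "right" then (some "up", element, acc ++ [1, 0])
     else (heading, element, acc))
  else if prior.2 > element.2 then -- down
    (if heading == some "down" then (some "down", element, acc ++ [0])
     else if heading == some "left" then (some "down", element, acc ++ [1, 0])
     else if heading == some "up" then (some "down", element, acc ++ [3, 0])
     else if heading == some "right" then (some "down", element, acc ++ [2, 0])
     else (heading, element, acc))
  else st

def headingA (start_point : Int) : Option String :=
  if 3 ≥ start_point ∧ start_point ≥ 0 then some "down"
  else if start_point ≥ 4 ∧ start_point ≤ 8 then some "left"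
  else if start_point ≥ 9 ∧ start_point ≤ 12 then some "up"
  else if start_point ≥ 13 ∧ start_point ≤ 17 then some "right"
  else none

def list_commands (commands : List (Int × Int)) (start_point : Int) : List Int :=
  match PySem.List.pyGet? commands 0 with  -- commands[0]; none = IndexError, excluded by Pre_
  | none => []
  | some p0 => (commands.foldl stepA (headingA start_point, p0, ([] : List Int))).2.2

-- ===== PORT B =====
-- stage 1 of Source B: collapse the path into direction codes right=0, up=1, left=2, down=3
def step1 (st : (Int × Int) × List Int) (p : Int × Int) : (Int × Int) × List Int :=
  if p.1 ≠ st.1.1 then (p, st.2 ++ [if p.1 > st.1.1 then (0 : Int) else 2])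
  else if p.2 ≠ st.1.2 then (p, st.2 ++ [if p.2 > st.1.2 then (1 : Int) else 3])
  else st

-- stage 3 of Source B: diff = (d - h) % 4; if diff: append (0,1,3,2)[diff]; append 0; h = d
-- the tuple index (0,1,3,2)[diff] is ported via pyGet?; diff ∈ {1,2,3} whenever it is read
def step2 (st : Int × List Int) (d : Int) : Int × List Int :=
  let diff := PySem.Int.mod (d - st.1) 4
  (d, st.2 ++ (if diff ≠ 0 then [(PySem.List.pyGet? ([0, 1, 3, 2] : List Int) diff).getD 0] else []) ++ [0])

-- stage 2 of Source B: start heading as an angle code; none = Source B's early 'return []'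
def hcode0 (sp : Int) : Option Int :=
  if 0 ≤ sp ∧ sp ≤ 3 then some 3
  else if 4 ≤ sp ∧ sp ≤ 8 then some 2
  else if 9 ≤ sp ∧ sp ≤ 12 then some 1
  else if 13 ≤ sp ∧ sp ≤ 17 then some 0
  else none

def list_commands_alt (commands : List (Int × Int)) (start_point : Int) : List Int :=
  match PySem.List.pyGet? commands 0 with  -- commands[0]; none = IndexError, excluded by Pre_
  | none => []
  | some p0 =>
    let dirs := (commands.foldl step1 (p0, ([] : List Int))).2
    match hcode0 start_point with
    | none => []
    | some h => (dirs.foldl step2 (h, ([] : List Int))).2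

-- ===== PRECONDITION & SPEC =====
-- Pre_ excludes exactly the empty list: there commands[0] raises IndexError in A (and in B).
def Pre_list_commands (commands : List (Int × Int)) (start_point : Int) : Prop := commands ≠ []
instance (commands : List (Int × Int)) (start_point : Int) : Decidable (Pre_list_commands commands start_point) := by unfold Pre_list_commands; infer_instance
def pvWitness_list_commands : (List (Int × Int)) × Int := ([(0, 0), (0, 1)], 0)

def Spec_list_commands (commands : List (Int × Int)) (start_point : Int) (out : List Int) : Prop := out = list_commands_alt commands start_point
instance (commands : List (Int × Int)) (start_point : Int) (out : List Int) : Decidable (Spec_list_commands commands start_point out) := by unfold Spec_list_commands; infer_instance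

-- ===== CLAIM (what is proved, stated in full; the proofs are below) =====
def Claim_equal_list_commands : Prop := ∀ (commands : List (Int × Int)) (start_point : Int), Dom_list_commands commands start_point → Pre_list_commands commands start_point → Spec_list_commands commands start_point (list_commands commands start_point)

-- ===== LEMMAS AND PROOFS =====

-- angle code → A's heading string
def sname (h : Int) : String :=
  if h = 0 then "right" else if h = 1 then "up" else if h = 2 then "left" else "down"

-- direction of the move prior → p as an angle code; none = no move
def dOf (prior p : Int × Int) : Option Int :=
  if p.1 ≠ prior.1 then some (if p.1 > prior.1 then 0 else 2)
  else if p.2 ≠ prior.2 then some (if p.2 > prior.2 then 1 else 3)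
  else none

-- specification of stage 1: the direction codes of the path, recursively
def dirsSpec (prior : Int × Int) : List (Int × Int) → List Int
  | [] => []
  | p :: rest =>
    match dOf prior p with
    | none => dirsSpec prior rest
    | some d => d :: dirsSpec p rest

lemma dOf_mem {prior p : Int × Int} {d : Int} (h : dOf prior p = some d) :
    d = 0 ∨ d = 1 ∨ d = 2 ∨ d = 3 := by
  simp only [dOf] at h; split_ifs at h <;> simp_all

lemma step1_char (st : (Int × Int) × List Int) (p : Int × Int) :
    step1 st p = match dOf st.1 p with
      | none => st
      | some d => (p, st.2 ++ [d]) := by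
  simp only [step1, dOf]; split_ifs <;> rfl

lemma step1_fold (cmds : List (Int × Int)) (prior : Int × Int) (ds : List Int) :
    (cmds.foldl step1 (prior, ds)).2 = ds ++ dirsSpec prior cmds := by
  induction cmds generalizing prior ds with
  | nil => simp [dirsSpec]
  | cons p rest ih =>
    rw [List.foldl_cons, step1_char, dirsSpec]
    cases dOf prior p <;> simp [ih]

lemma step2_state (h d : Int) (acc : List Int) :
    step2 (h, acc) d = (d, (step2 (h, acc) d).2) := rfl

lemma A_none (cmds : List (Int × Int)) (prior : Int × Int) (acc : List Int) :
    (cmds.foldl stepA (none, prior, acc)).2.2 = acc := by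
  induction cmds generalizing prior with
  | nil => rfl
  | cons p rest ih =>
    simp only [List.foldl_cons, stepA]
    split_ifs <;> simp_all

-- A's step, characterised through the move direction and B's emission step
lemma stepA_char (h : Int) (hh : h = 0 ∨ h = 1 ∨ h = 2 ∨ h = 3)
    (prior p : Int × Int) (acc : List Int) :
    stepA (some (sname h), prior, acc) p =
      match dOf prior p with
      | none => (some (sname h), prior, acc)
      | some d => (some (sname d), p, (step2 (h, acc) d).2) := by
  rcases hh with rfl | rfl | rfl | rfl <;>
    · simp only [stepA, dOf, sname]
      rcases lt_trichotomy prior.1 p.1 with h1 | h1 | h1 <;>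
        rcases lt_trichotomy prior.2 p.2 with h2 | h2 | h2 <;>
          simp_all [step2, PySem.Int.mod, ne_of_gt, ne_of_lt, not_lt_of_gt]

lemma A_some (cmds : List (Int × Int)) (prior : Int × Int) (h : Int) (acc : List Int)
    (hh : h = 0 ∨ h = 1 ∨ h = 2 ∨ h = 3) :
    (cmds.foldl stepA (some (sname h), prior, acc)).2.2
      = ((dirsSpec prior cmds).foldl step2 (h, acc)).2 := by
  induction cmds generalizing prior h acc with
  | nil => rfl
  | cons p rest ih =>
    rw [List.foldl_cons, stepA_char h hh prior p acc, dirsSpec]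
    cases hd : dOf prior p with
    | none => exact ih prior h acc hh
    | some d =>
      rw [List.foldl_cons, step2_state h d acc]
      exact ih p d _ (dOf_mem hd)

lemma hcode0_headingA (sp : Int) :
    headingA sp = (hcode0 sp).map sname := by
  simp only [headingA, hcode0]
  split_ifs <;> simp [sname] <;> omega

-- ===== VERDICT (by name: the statement is the Claim_ definition above) =====
theorem list_commands_spec : Claim_equal_list_commands := by
  intro commands sp _ hpre
  unfold Spec_list_commands list_commands list_commands_alt
  cases commands with
  | nil => exact absurd rfl hpre
  | cons p0 rest =>
    have hc : PySem.List.pyGet? (p0 :: rest) 0 = some p0 := by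
      simp [PySem.List.pyGet?, PySem.List.pyIdx?]
    rw [hc]
    simp only [hcode0_headingA]
    cases hh : hcode0 sp with
    | none => simpa using A_none (p0 :: rest) p0 []
    | some h =>
      have hmem : h = 0 ∨ h = 1 ∨ h = 2 ∨ h = 3 := by
        simp only [hcode0] at hh; split_ifs at hh <;> simp_all
      simp only [Option.map_some, step1_fold, List.nil_append]
      exact A_some (p0 :: rest) p0 h [] hmem
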